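-- pv_equiv track=rewrite | github.com/ednira/cnets_project | flt/flt_dep_matrix.py | activity_frequencies
-- ===== SOURCE A (Python) =====
-- def activity_frequencies(log):
--    """Calculate frequencies of activity ai followed by activity aj and store them in a dictionary"""
--
--    act_frequencies = dict()
--
--    for caseID in log:
--       for i in range(0, len(log[caseID])-1):
--          ai = log[caseID] [i] [0]
--          aj = log[caseID] [i+1] [0]
--          if ai not in act_frequencies:
--             act_frequencies[ai] = dict()
--          if aj not in act_frequencies[ai]:
--             act_frequencies[ai][aj] = 0
--          act_frequencies[ai][aj] += 1
--          if aj not in act_frequencies: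
--             act_frequencies[aj] = dict()
--
--
--    for key in act_frequencies:
--       if key not in act_frequencies[key]:
--          act_frequencies[key][key] = 0
--
--    return act_frequencies
-- ===== SOURCE B (Python) =====
-- def activity_frequencies(log):
--     """Calculate frequencies of activity ai followed by activity aj and store them in a dictionary"""
--     # Pass 1: a flat counter of consecutive (ai, aj) pairs, plus the key order.
--     pair_count = {}
--     key_order = []
--     for caseID in log:
--         events = log[caseID]
--         for x, y in zip(events, events[1:]):
--             a, b = x[0], y[0]
--             pair_count[(a, b)] = pair_count.get((a, b), 0) + 1
--             if a not in key_order: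
--                 key_order.append(a)
--             if b not in key_order:
--                 key_order.append(b)
--     # Pass 2: build the nested dict from the flat counter.
--     result = {}
--     for k in key_order:
--         inner = {j: c for (i, j), c in pair_count.items() if i == k}
--         if k not in inner:
--             inner[k] = 0
--         result[k] = inner
--     return result
-- ===== Notes on version B (the rewrite author's own statement) =====
-- stated objective: alternative
-- what changed: A mutates a nested dict-of-dicts in place while walking index pairs and then zero-fills missing self-loops; B instead builds a flat Counter-style dict of consecutive (ai, aj) pairs plus a first-appearance key-order list in one pass over zip(events, events[1:]), and reconstructs the nested result dict from that flat counter in a second pass.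
import Mathlib
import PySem

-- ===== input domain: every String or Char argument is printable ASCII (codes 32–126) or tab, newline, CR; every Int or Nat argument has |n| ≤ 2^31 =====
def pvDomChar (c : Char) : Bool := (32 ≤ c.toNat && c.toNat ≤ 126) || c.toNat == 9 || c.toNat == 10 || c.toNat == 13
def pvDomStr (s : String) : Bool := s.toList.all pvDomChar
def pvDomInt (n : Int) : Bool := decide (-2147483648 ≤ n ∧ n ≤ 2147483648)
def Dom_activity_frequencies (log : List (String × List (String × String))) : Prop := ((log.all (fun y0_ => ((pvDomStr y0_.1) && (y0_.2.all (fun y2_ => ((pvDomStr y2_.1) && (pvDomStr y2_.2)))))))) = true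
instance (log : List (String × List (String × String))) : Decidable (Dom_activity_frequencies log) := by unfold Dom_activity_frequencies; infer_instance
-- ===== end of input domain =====

-- B re-decomposes A: one pass builds a flat counter of consecutive activity pairs plus the
-- key-order list, then the nested dict is rebuilt from that counter (objective: alternative
-- decomposition, same values in the same order).

-- ===== PORT A =====
def afA_step (acc : PySem.Dict String (PySem.Dict String Int)) (ai aj : String) :
    PySem.Dict String (PySem.Dict String Int) :=
  let acc := if acc.contains ai then acc else acc.insert ai PySem.Dict.empty
  let inner := acc.getD ai PySem.Dict.empty
  let inner := if inner.contains aj then inner else inner.insert aj 0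
  let inner := inner.insert aj (inner.getD aj 0 + 1)
  let acc := acc.insert ai inner
  if acc.contains aj then acc else acc.insert aj PySem.Dict.empty

def activity_frequencies (log : List (String × List (String × String))) : List (String × List (String × Int)) :=
  let d := PySem.Dict.ofList log
  let act := d.items.foldl
    (fun acc c =>
      (PySem.List.pyRange 0 ((PySem.List.len c.2) - 1) 1).foldl
        (fun acc i =>
          afA_step acc (PySem.List.pyGetD c.2 i ("", "")).1 (PySem.List.pyGetD c.2 (i+1) ("", "")).1)
        acc)
    PySem.Dict.empty
  let act := act.keys.foldl
    (fun a key =>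
      if (a.getD key PySem.Dict.empty).contains key then a
      else a.insert key ((a.getD key PySem.Dict.empty).insert key 0))
    act
  act.items.map (fun p => (p.1, p.2.items))

-- ===== PORT B =====
def afB_step (st : PySem.Dict (String × String) Int × List String) (a b : String) :
    PySem.Dict (String × String) Int × List String :=
  let pc := st.1.insert (a, b) (st.1.getD (a, b) 0 + 1)
  let ko := if a ∈ st.2 then st.2 else st.2 ++ [a]
  let ko := if b ∈ ko then ko else ko ++ [b]
  (pc, ko)

def activity_frequencies_alt (log : List (String × List (String × String))) : List (String × List (String × Int)) :=
  let d := PySem.Dict.ofList log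
  let st := d.items.foldl
    (fun st c => (c.2.zip (c.2.drop 1)).foldl (fun st p => afB_step st p.1.1 p.2.1) st)
    ((PySem.Dict.empty : PySem.Dict (String × String) Int), ([] : List String))
  let result := st.2.foldl
    (fun r k =>
      let inner := PySem.Dict.ofList
        ((st.1.items.filter (fun q => q.1.1 == k)).map (fun q => (q.1.2, q.2)))
      let inner := if inner.contains k then inner else inner.insert k 0
      r.insert k inner)
    (PySem.Dict.empty : PySem.Dict String (PySem.Dict String Int))
  result.items.map (fun p => (p.1, p.2.items))

-- ===== PRECONDITION & SPEC =====
def Spec_activity_frequencies (log : List (String × List (String × String))) (out : List (String × List (String × Int))) : Prop := out = activity_frequencies_alt log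
instance (log : List (String × List (String × String))) (out : List (String × List (String × Int))) : Decidable (Spec_activity_frequencies log out) := by unfold Spec_activity_frequencies; infer_instance

-- ===== CLAIM (what is proved, stated in full; the proofs are below) =====
def Claim_equal_activity_frequencies : Prop := ∀ (log : List (String × List (String × String))), Dom_activity_frequencies log → Spec_activity_frequencies log (activity_frequencies log)

-- ===== LEMMAS AND PROOFS =====

theorem filterProj_replace_ne (v : Int) (l : List ((String × String) × Int)) (a b k : String)
    (hk : k ≠ a) :
    ((l.map (fun q => if q.1 == (a, b) then ((a, b), v) else q)).filter
        (fun q => q.1.1 == k)).map (fun q => (q.1.2, q.2))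
    = (l.filter (fun q => q.1.1 == k)).map (fun q => (q.1.2, q.2)) := by
  induction l with
  | nil => rfl
  | cons q t ih =>
    simp only [beq_iff_eq] at ih ⊢
    by_cases hq : q.1 = (a, b)
    · have h1 : ¬ (q.1.1 = k) := by rw [hq]; exact fun h => hk (h.symm)
      simp [hq, ih, Ne.symm hk]
    · by_cases h2 : q.1.1 = k <;> simp [hq, h2, ih]

theorem filterProj_replace_eq (v : Int) (l : List ((String × String) × Int)) (a b : String) :
    ((l.map (fun q => if q.1 == (a, b) then ((a, b), v) else q)).filter
        (fun q => q.1.1 == a)).map (fun q => (q.1.2, q.2))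
    = ((l.filter (fun q => q.1.1 == a)).map (fun q => (q.1.2, q.2))).map
        (fun r => if r.1 == b then (b, v) else r) := by
  induction l with
  | nil => rfl
  | cons q t ih =>
    simp only [beq_iff_eq] at ih ⊢
    by_cases hq : q.1 = (a, b)
    · simp [hq, ih]
    · by_cases h2 : q.1.1 = a
      · have hb : ¬ (q.1.2 = b) := by
          intro h; exact hq (by ext <;> simp [h2, h])
        simp [hq, h2, hb, ih]
      · simp [hq, h2, ih]

theorem map_replace_id {x : String × Int} (b : String) (l : List (String × Int))
    (h : ∀ q ∈ l, q.1 ≠ b) :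
    l.map (fun q => if q.1 == b then x else q) = l := by
  induction l with
  | nil => rfl
  | cons q t ih =>
    have h1 := h q (by simp)
    have h2 := ih (fun r hr => h r (by simp [hr]))
    simp only [beq_iff_eq] at h2 ⊢
    simp [h1, h2]

theorem seconds_nodup (l : List ((String × String) × Int)) (k : String)
    (h : (l.map (·.1)).Nodup) :
    ((l.filter (fun q => q.1.1 == k)).map (fun q => q.1.2)).Nodup := by
  induction l with
  | nil => simp
  | cons q t ih =>
    simp only [List.map_cons, List.nodup_cons] at h
    by_cases h2 : q.1.1 = k
    · simp only [List.filter_cons, h2, beq_self_eq_true, if_pos, List.map_cons, List.nodup_cons]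
      refine ⟨?_, ih h.2⟩
      intro hmem
      simp only [List.mem_map, List.mem_filter, beq_iff_eq] at hmem
      obtain ⟨r, ⟨hr, hrk⟩, hre⟩ := hmem
      apply h.1
      simp only [List.mem_map]
      refine ⟨r, hr, ?_⟩
      have : r.1 = q.1 := Prod.ext (by rw [hrk, h2]) hre
      rw [this]
    · simp only [List.filter_cons]
      simp [h2]
      exact ih h.2

def AFInv (act : PySem.Dict String (PySem.Dict String Int))
    (pc : PySem.Dict (String × String) Int) (ko : List String) : Prop :=
  act.keys = ko ∧ act.keys.Nodup ∧ pc.keys.Nodup ∧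
  ∀ k, (act.getD k PySem.Dict.empty).items
      = (pc.items.filter (fun q => q.1.1 == k)).map (fun q => (q.1.2, q.2))

-- helper list lemmas

theorem afA_char (act : PySem.Dict String (PySem.Dict String Int)) (a b : String)
    (hknd : act.keys.Nodup) :
    ((afA_step act a b).keys
        = (if b ∈ (if a ∈ act.keys then act.keys else act.keys ++ [a])
           then (if a ∈ act.keys then act.keys else act.keys ++ [a])
           else (if a ∈ act.keys then act.keys else act.keys ++ [a]) ++ [b]))
    ∧ (afA_step act a b).keys.Nodup
    ∧ ((afA_step act a b).getD a PySem.Dict.empty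
        = (if (act.getD a PySem.Dict.empty).contains b
           then act.getD a PySem.Dict.empty
           else (act.getD a PySem.Dict.empty).insert b 0).insert b
            ((if (act.getD a PySem.Dict.empty).contains b
              then act.getD a PySem.Dict.empty
              else (act.getD a PySem.Dict.empty).insert b 0).getD b 0 + 1))
    ∧ (∀ k, k ≠ a → (afA_step act a b).getD k PySem.Dict.empty = act.getD k PySem.Dict.empty) := by
  simp only [afA_step]
  set act1 := if act.contains a = true then act else act.insert a PySem.Dict.empty with hact1
  have hact1getD : ∀ k, act1.getD k PySem.Dict.empty = act.getD k PySem.Dict.empty := by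
    intro k
    rw [hact1]
    by_cases hu : act.contains a = true
    · simp [hu]
    · have hu' : act.contains a = false := by simpa using hu
      simp only [hu', Bool.false_eq_true, if_false]
      rw [PySem.Dict.getD_insert]
      by_cases hka : k = a
      · rw [if_pos hka, hka, PySem.Dict.getD_of_not_contains _ _ hu']
      · rw [if_neg hka]
  have hact1keys : act1.keys = if a ∈ act.keys then act.keys else act.keys ++ [a] := by
    rw [hact1, PySem.Dict.contains_eq_decide_mem_keys]
    by_cases hu : a ∈ act.keys
    · simp [hu]
    · simp only [hu, decide_false, Bool.false_eq_true, if_false]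
      exact PySem.Dict.keys_insert_of_not_contains _ _
        (by rw [PySem.Dict.contains_eq_decide_mem_keys]; simp [hu])
  have hact1nd : act1.keys.Nodup := by
    rw [hact1keys]
    by_cases hu : a ∈ act.keys
    · simpa [hu] using hknd
    · simp [hu, List.nodup_append, hknd]
      exact fun x hx hxa => hu (hxa ▸ hx)
  have hact1conta : act1.contains a = true := by
    rw [PySem.Dict.contains_eq_decide_mem_keys, hact1keys]
    by_cases hu : a ∈ act.keys <;> simp [hu]
  rw [hact1getD a]
  set inner := act.getD a PySem.Dict.empty with hinner
  set i1 := if inner.contains b = true then inner else inner.insert b 0 with hi1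
  set i2 := i1.insert b (i1.getD b 0 + 1) with hi2
  have hkeys2 : (act1.insert a i2).keys = act1.keys :=
    PySem.Dict.keys_insert_of_contains _ _ hact1conta
  have hcont2 : (act1.insert a i2).contains b = decide (b ∈ act1.keys) := by
    rw [PySem.Dict.contains_eq_decide_mem_keys, hkeys2]
  by_cases hv : b ∈ act1.keys
  · simp only [hcont2, hv, decide_true, if_true]
    refine ⟨?_, ?_, ?_, ?_⟩
    · rw [hkeys2, hact1keys]
      by_cases hu : a ∈ act.keys <;> simp_all
    · rw [hkeys2]; exact hact1nd
    · rw [PySem.Dict.getD_insert_self]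
    · intro k hka
      rw [PySem.Dict.getD_insert, if_neg hka, hact1getD]
  · have hv' : (act1.insert a i2).contains b = false := by rw [hcont2]; simp [hv]
    simp only [hcont2, hv, decide_false, Bool.false_eq_true, if_false]
    have hab : ¬ (a = b) := fun h => hv (h ▸ ((PySem.Dict.contains_iff_mem_keys _ _).1 hact1conta))
    have hkeys3 : ((act1.insert a i2).insert b PySem.Dict.empty).keys = act1.keys ++ [b] := by
      rw [PySem.Dict.keys_insert_of_not_contains _ _ hv', hkeys2]
    refine ⟨?_, ?_, ?_, ?_⟩
    · rw [hkeys3, hact1keys]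
      by_cases hu : a ∈ act.keys <;> simp_all
    · rw [hkeys3]; simp [List.nodup_append, hact1nd]
      exact fun x hx hxb => hv (hxb ▸ hx)
    · rw [PySem.Dict.getD_insert, if_neg hab, PySem.Dict.getD_insert_self]
    · intro k hka
      rw [PySem.Dict.getD_insert]
      by_cases hkb : k = b
      · rw [if_pos hkb, hkb]
        have hbact : act.contains b = false := by
          rw [PySem.Dict.contains_eq_decide_mem_keys]
          have : b ∉ act.keys := by
            intro hmem; apply hv; rw [hact1keys]
            by_cases hu : a ∈ act.keys <;> simp [hu, hmem]
          simp [this]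
        rw [PySem.Dict.getD_of_not_contains _ _ hbact]
      · rw [if_neg hkb, PySem.Dict.getD_insert, if_neg hka, hact1getD]

theorem inv_step (act : PySem.Dict String (PySem.Dict String Int))
    (pc : PySem.Dict (String × String) Int) (ko : List String) (a b : String)
    (h : AFInv act pc ko) :
    AFInv (afA_step act a b) (afB_step (pc, ko) a b).1 (afB_step (pc, ko) a b).2 := by
  obtain ⟨hk, hknd, hpcnd, hit⟩ := h
  subst hk
  obtain ⟨hAkeys, hAnd, hAgetDa, hAgetD⟩ := afA_char act a b hknd
  have hitA : (act.getD a PySem.Dict.empty).items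
      = (pc.items.filter (fun q => q.1.1 == a)).map (fun q => (q.1.2, q.2)) := hit a
  have hinnerkeys : (act.getD a PySem.Dict.empty).keys
      = (pc.items.filter (fun q => q.1.1 == a)).map (fun q => q.1.2) := by
    show (act.getD a PySem.Dict.empty).items.map (·.1) = _
    rw [hitA, List.map_map]; rfl
  have hinnernd : (act.getD a PySem.Dict.empty).keys.Nodup := by
    rw [hinnerkeys]; exact seconds_nodup _ _ hpcnd
  have hcb : (act.getD a PySem.Dict.empty).contains b = pc.contains (a, b) := by
    rw [PySem.Dict.contains_eq_decide_mem_keys, PySem.Dict.contains_eq_decide_mem_keys]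
    apply decide_eq_decide.mpr
    rw [hinnerkeys]
    show _ ↔ (a, b) ∈ pc.items.map (·.1)
    simp only [List.mem_map, List.mem_filter, beq_iff_eq]
    constructor
    · rintro ⟨q, ⟨hq, hqa⟩, hqb⟩
      exact ⟨q, hq, by rw [← Prod.mk.eta (p := q.1), hqa, hqb]⟩
    · rintro ⟨q, hq, hqe⟩
      exact ⟨q, ⟨hq, by rw [hqe]⟩, by rw [hqe]⟩
  have hBfst : (afB_step (pc, act.keys) a b).1 = pc.insert (a, b) (pc.getD (a, b) 0 + 1) := rfl
  have hBsnd : (afB_step (pc, act.keys) a b).2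
      = (if b ∈ (if a ∈ act.keys then act.keys else act.keys ++ [a])
         then (if a ∈ act.keys then act.keys else act.keys ++ [a])
         else (if a ∈ act.keys then act.keys else act.keys ++ [a]) ++ [b]) := rfl
  refine ⟨?_, ?_, ?_, ?_⟩
  · rw [hBsnd]; exact hAkeys
  · exact hAnd
  · rw [hBfst]; exact PySem.Dict.nodup_keys_insert _ _ _ hpcnd
  · intro k
    rw [hBfst]
    by_cases hka : k = a
    · subst hka
      rw [hAgetDa]
      by_cases hw : pc.contains (k, b) = true
      · -- the pair was already counted: in-place replacement on both sides
        have hwb : (act.getD k PySem.Dict.empty).contains b = true := by rw [hcb, hw]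
        have hgd : (act.getD k PySem.Dict.empty).getD b 0 = pc.getD (k, b) 0 := by
          obtain ⟨c, hc⟩ : ∃ c, ((k, b), c) ∈ pc.items := by
            have hmem := (PySem.Dict.contains_iff_mem_keys _ _).1 hw
            obtain ⟨q, hq, hqe⟩ := List.mem_map.1 hmem
            exact ⟨q.2, by rw [← hqe, Prod.mk.eta]; exact hq⟩
          have h1 : pc.getD (k, b) 0 = c := PySem.Dict.getD_of_mem_items pc hc hpcnd 0
          have h2 : (b, c) ∈ (act.getD k PySem.Dict.empty).items := by
            rw [hitA]
            simp only [List.mem_map, List.mem_filter, beq_iff_eq]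
            exact ⟨((k, b), c), ⟨hc, rfl⟩, rfl⟩
          rw [PySem.Dict.getD_of_mem_items _ h2 hinnernd 0, h1]
        rw [if_pos hwb, PySem.Dict.items_insert_of_contains _ _ hwb,
            PySem.Dict.items_insert_of_contains _ _ hw, filterProj_replace_eq, hitA, hgd]
      · -- fresh pair: both sides append a fresh entry
        have hw' : pc.contains (k, b) = false := by simpa using hw
        have hwb : (act.getD k PySem.Dict.empty).contains b = false := by rw [hcb, hw']
        have hnotin : ∀ q ∈ (act.getD k PySem.Dict.empty).items, q.1 ≠ b := by
          intro q hq hqb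
          have : b ∈ (act.getD k PySem.Dict.empty).keys := by
            show b ∈ (act.getD k PySem.Dict.empty).items.map (·.1)
            exact List.mem_map.mpr ⟨q, hq, hqb⟩
          rw [PySem.Dict.contains_eq_decide_mem_keys] at hwb
          simp [this] at hwb
        rw [if_neg (by simp [hwb]), PySem.Dict.items_insert_of_not_contains _ _ hw',
            PySem.Dict.getD_of_not_contains _ _ hw']
        have hc1 : ((act.getD k PySem.Dict.empty).insert b 0).contains b = true :=
          PySem.Dict.contains_insert_self _ _ _
        rw [PySem.Dict.items_insert_of_contains _ _ hc1,
            PySem.Dict.items_insert_of_not_contains _ _ hwb,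
            PySem.Dict.getD_insert_self]
        rw [List.map_append, map_replace_id b _ hnotin, hitA]
        simp
    · rw [hAgetD k hka]
      by_cases hw : pc.contains (a, b) = true
      · rw [PySem.Dict.items_insert_of_contains _ _ hw,
            filterProj_replace_ne _ _ _ _ _ hka]
        exact hit k
      · rw [PySem.Dict.items_insert_of_not_contains _ _ (by simpa using hw)]
        rw [List.filter_append, List.map_append]
        have : (([((a, b), pc.getD (a, b) 0 + 1)]).filter (fun q => q.1.1 == k)) = [] := by
          simp [Ne.symm hka]
        rw [this]
        simp [hit k]

theorem inv_empty : AFInv PySem.Dict.empty PySem.Dict.empty [] := by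
  refine ⟨rfl, by simp [PySem.Dict.keys_empty], by simp [PySem.Dict.keys_empty], ?_⟩
  intro k
  rw [PySem.Dict.getD_empty]
  rfl

theorem inv_foldl (ps : List (String × String))
    (act : PySem.Dict String (PySem.Dict String Int))
    (pc : PySem.Dict (String × String) Int) (ko : List String) (h : AFInv act pc ko) :
    AFInv (ps.foldl (fun acc p => afA_step acc p.1 p.2) act)
      ((ps.foldl (fun st p => afB_step st p.1 p.2) ((pc, ko) : PySem.Dict (String × String) Int × List String)).1)
      ((ps.foldl (fun st p => afB_step st p.1 p.2) ((pc, ko) : PySem.Dict (String × String) Int × List String)).2) := by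
  induction ps generalizing act pc ko with
  | nil => exact h
  | cons p t ih =>
    simp only [List.foldl_cons]
    have h' := inv_step act pc ko p.1 p.2 h
    have h2 := ih (afA_step act p.1 p.2) (afB_step (pc, ko) p.1 p.2).1 (afB_step (pc, ko) p.1 p.2).2 h'
    simpa using h2

-- the zero-fill applied to one inner dict

def fillInner (k : String) (v : PySem.Dict String Int) : PySem.Dict String Int :=
  if v.contains k then v else v.insert k 0

theorem fill_char (ks : List String) (d : PySem.Dict String (PySem.Dict String Int))
    (hsub : ∀ k ∈ ks, d.contains k = true) (hnd : ks.Nodup) :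
    ((ks.foldl (fun a key =>
        if (a.getD key PySem.Dict.empty).contains key then a
        else a.insert key ((a.getD key PySem.Dict.empty).insert key 0)) d).keys = d.keys)
    ∧ ∀ k, (ks.foldl (fun a key =>
        if (a.getD key PySem.Dict.empty).contains key then a
        else a.insert key ((a.getD key PySem.Dict.empty).insert key 0)) d).getD k PySem.Dict.empty
        = if k ∈ ks then fillInner k (d.getD k PySem.Dict.empty) else d.getD k PySem.Dict.empty := by
  induction ks generalizing d with
  | nil => exact ⟨rfl, by simp⟩
  | cons k0 t ih =>
    simp only [List.foldl_cons]
    set d' := if (d.getD k0 PySem.Dict.empty).contains k0 then d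
        else d.insert k0 ((d.getD k0 PySem.Dict.empty).insert k0 0) with hd'
    have hk0 : d.contains k0 = true := hsub k0 (by simp)
    have hdkeys : d'.keys = d.keys := by
      rw [hd']
      by_cases hc : (d.getD k0 PySem.Dict.empty).contains k0 = true
      · simp [hc]
      · have hc' : (d.getD k0 PySem.Dict.empty).contains k0 = false := by simpa using hc
        simp only [hc', Bool.false_eq_true, if_false]
        exact PySem.Dict.keys_insert_of_contains _ _ hk0
    have hdg0 : d'.getD k0 PySem.Dict.empty = fillInner k0 (d.getD k0 PySem.Dict.empty) := by
      rw [hd', fillInner]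
      by_cases hc : (d.getD k0 PySem.Dict.empty).contains k0 = true
      · simp [hc]
      · have hc' : (d.getD k0 PySem.Dict.empty).contains k0 = false := by simpa using hc
        simp only [hc', Bool.false_eq_true, if_false]
        rw [PySem.Dict.getD_insert_self]
    have hdg : ∀ k, k ≠ k0 → d'.getD k PySem.Dict.empty = d.getD k PySem.Dict.empty := by
      intro k hkk
      rw [hd']
      by_cases hc : (d.getD k0 PySem.Dict.empty).contains k0 = true
      · simp [hc]
      · have hc' : (d.getD k0 PySem.Dict.empty).contains k0 = false := by simpa using hc
        simp only [hc', Bool.false_eq_true, if_false]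
        rw [PySem.Dict.getD_insert, if_neg hkk]
    have hsub' : ∀ k ∈ t, d'.contains k = true := by
      intro k hkt
      rw [PySem.Dict.contains_eq_decide_mem_keys, hdkeys,
        ← PySem.Dict.contains_eq_decide_mem_keys]
      exact hsub k (by simp [hkt])
    obtain ⟨ih1, ih2⟩ := ih d' hsub' hnd.of_cons
    refine ⟨by rw [ih1, hdkeys], ?_⟩
    intro k
    rw [ih2 k]
    by_cases hkt : k ∈ t
    · have hkk0 : k ≠ k0 := fun h => (List.nodup_cons.1 hnd).1 (h ▸ hkt)
      simp only [hkt, List.mem_cons, or_true, if_pos]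
      rw [hdg k hkk0]
    · by_cases hkk0 : k = k0
      · subst hkk0
        simp only [hkt, if_false, List.mem_cons, true_or, if_pos]
        exact hdg0
      · simp only [hkt, if_false]
        have : ¬ (k ∈ k0 :: t) := by simp [hkk0, hkt]
        rw [if_neg this, hdg k hkk0]

def pairsOf (ev : List (String × String)) : List (String × String) :=
  (ev.zip (ev.drop 1)).map (fun q => (q.1.1, q.2.1))

theorem aLoop_eq_pairs (ev : List (String × String))
    (acc : PySem.Dict String (PySem.Dict String Int)) :
    (PySem.List.pyRange 0 ((PySem.List.len ev) - 1) 1).foldl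
      (fun acc i =>
        afA_step acc (PySem.List.pyGetD ev i ("", "")).1 (PySem.List.pyGetD ev (i+1) ("", "")).1)
      acc
    = (pairsOf ev).foldl (fun acc p => afA_step acc p.1 p.2) acc := by
  rcases ev with _ | ⟨e, t⟩
  · rw [PySem.List.pyRange_one_eq_nil (by simp [PySem.List.len_eq])]
    simp [pairsOf]
  · set ev := e :: t with hev
    have hlen : (PySem.List.len ev) - 1 = ((ev.zip (ev.drop 1)).length : Int) := by
      simp [PySem.List.len_eq, hev]
    rw [hlen]
    have hcong : ∀ (a : PySem.Dict String (PySem.Dict String Int)) (i : Int),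
        i ∈ PySem.List.pyRange 0 ((ev.zip (ev.drop 1)).length : Int) 1 →
        afA_step a (PySem.List.pyGetD ev i ("", "")).1 (PySem.List.pyGetD ev (i+1) ("", "")).1
        = afA_step a (PySem.List.pyGetD (ev.zip (ev.drop 1)) i (("",""),("",""))).1.1
            (PySem.List.pyGetD (ev.zip (ev.drop 1)) i (("",""),("",""))).2.1 := by
      intro a i hi
      rw [PySem.List.mem_pyRange_one] at hi
      obtain ⟨n, rfl⟩ : ∃ n : Nat, i = (n : Int) := ⟨i.toNat, by omega⟩
      have h1 : n < (ev.zip (ev.drop 1)).length := by exact_mod_cast hi.2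
      have h2 : n < ev.length := by simp at h1; omega
      have h3 : n + 1 < ev.length := by simp at h1 ⊢; omega
      have e1 : ((n : Int) + 1) = ((n + 1 : Nat) : Int) := by push_cast; ring
      rw [e1]
      simp only [PySem.List.pyGetD_natCast]
      rw [List.getD_eq_getElem _ _ h1, List.getD_eq_getElem _ _ h2, List.getD_eq_getElem _ _ h3]
      simp [List.getElem_zip]
    rw [PySem.List.foldl_congr_mem _ _ _ _ (fun a i hi => hcong a i hi)]
    rw [PySem.List.foldl_pyRange_zero_pyGetD' (ev.zip (ev.drop 1)) (("",""),("","")) (fun a q => afA_step a q.1.1 q.2.1) acc]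
    simp [pairsOf, List.foldl_map]

theorem foldl_foldl_flatMap' {γ π σ : Type} (cs : List γ) (g : γ → List π) (f : σ → π → σ)
    (init : σ) :
    cs.foldl (fun s c => (g c).foldl f s) init = (cs.flatMap g).foldl f init := by
  induction cs generalizing init with
  | nil => rfl
  | cons c t ih => simp [List.foldl_append, ih]

theorem ofList_items_of_nodup (l : List (String × Int)) (h : (l.map (·.1)).Nodup) :
    (PySem.Dict.ofList l).items = l := by
  have h0 : PySem.Dict.ofList l = l.foldl (fun d p => d.insert p.1 p.2) PySem.Dict.empty := rfl
  rw [h0, PySem.Dict.items_foldl_insert_fresh l (fun p => p.1) (fun p => p.2) PySem.Dict.empty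
    (fun p _ => PySem.Dict.contains_empty _) h]
  simp [show (PySem.Dict.empty : PySem.Dict String Int).items = [] from rfl]

theorem main_eq (log : List (String × List (String × String))) :
    activity_frequencies log = activity_frequencies_alt log := by
  unfold activity_frequencies activity_frequencies_alt
  simp only []
  set cs := (PySem.Dict.ofList log).items with hcs
  have hA1 : cs.foldl
      (fun acc c =>
        (PySem.List.pyRange 0 ((PySem.List.len c.2) - 1) 1).foldl
          (fun acc i =>
            afA_step acc (PySem.List.pyGetD c.2 i ("", "")).1 (PySem.List.pyGetD c.2 (i+1) ("", "")).1)
          acc)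
      PySem.Dict.empty
      = (cs.flatMap (fun c => pairsOf c.2)).foldl (fun acc p => afA_step acc p.1 p.2) PySem.Dict.empty := by
    rw [← foldl_foldl_flatMap']
    exact PySem.List.foldl_congr_mem _ _ _ _ (fun acc c _ => aLoop_eq_pairs c.2 acc)
  have hB1 : cs.foldl
      (fun st c => (c.2.zip (c.2.drop 1)).foldl (fun st p => afB_step st p.1.1 p.2.1) st)
      ((PySem.Dict.empty : PySem.Dict (String × String) Int), ([] : List String))
      = (cs.flatMap (fun c => pairsOf c.2)).foldl (fun st p => afB_step st p.1 p.2)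
        ((PySem.Dict.empty : PySem.Dict (String × String) Int), ([] : List String)) := by
    rw [← foldl_foldl_flatMap']
    refine PySem.List.foldl_congr_mem _ _ _ _ (fun st c _ => ?_)
    rw [pairsOf, List.foldl_map]
  rw [hA1, hB1]
  set ps := cs.flatMap (fun c => pairsOf c.2) with hps
  set actF := ps.foldl (fun acc p => afA_step acc p.1 p.2) PySem.Dict.empty with hactF
  set stB := ps.foldl (fun st p => afB_step st p.1 p.2)
    ((PySem.Dict.empty : PySem.Dict (String × String) Int), ([] : List String)) with hstB
  obtain ⟨hkeq, hknd, hpcnd, hit⟩ := inv_foldl ps PySem.Dict.empty PySem.Dict.empty [] inv_empty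
  obtain ⟨hfk, hfg⟩ := fill_char actF.keys actF
    (fun k hk => by rw [PySem.Dict.contains_eq_decide_mem_keys]; simp [hk]) hknd
  set zf := actF.keys.foldl
    (fun a key =>
      if (a.getD key PySem.Dict.empty).contains key then a
      else a.insert key ((a.getD key PySem.Dict.empty).insert key 0)) actF with hzf
  have hzfnd : zf.keys.Nodup := by rw [hfk]; exact hknd
  rw [PySem.Dict.items_eq_map_keys zf hzfnd PySem.Dict.empty, hfk, List.map_map]
  -- RHS: the rebuild loop over fresh distinct keys appends one entry per key
  have hnd2 : stB.2.Nodup := by rw [← hkeq]; exact hknd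
  have hres : (stB.2.foldl
      (fun r k =>
        r.insert k
          (if (PySem.Dict.ofList
                ((stB.1.items.filter (fun q => q.1.1 == k)).map (fun q => (q.1.2, q.2)))).contains k
           then PySem.Dict.ofList
                ((stB.1.items.filter (fun q => q.1.1 == k)).map (fun q => (q.1.2, q.2)))
           else (PySem.Dict.ofList
                ((stB.1.items.filter (fun q => q.1.1 == k)).map (fun q => (q.1.2, q.2)))).insert k 0))
      (PySem.Dict.empty : PySem.Dict String (PySem.Dict String Int))).items
      = stB.2.map (fun k => (k,
          (if (PySem.Dict.ofList
                ((stB.1.items.filter (fun q => q.1.1 == k)).map (fun q => (q.1.2, q.2)))).contains k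
           then PySem.Dict.ofList
                ((stB.1.items.filter (fun q => q.1.1 == k)).map (fun q => (q.1.2, q.2)))
           else (PySem.Dict.ofList
                ((stB.1.items.filter (fun q => q.1.1 == k)).map (fun q => (q.1.2, q.2)))).insert k 0))) := by
    rw [PySem.Dict.items_foldl_insert_fresh stB.2 (fun k => k)
      (fun k => (if (PySem.Dict.ofList
                ((stB.1.items.filter (fun q => q.1.1 == k)).map (fun q => (q.1.2, q.2)))).contains k
           then PySem.Dict.ofList
                ((stB.1.items.filter (fun q => q.1.1 == k)).map (fun q => (q.1.2, q.2)))
           else (PySem.Dict.ofList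
                ((stB.1.items.filter (fun q => q.1.1 == k)).map (fun q => (q.1.2, q.2)))).insert k 0))
      PySem.Dict.empty (fun k _ => PySem.Dict.contains_empty _) (by simpa using hnd2)]
    simp [show (PySem.Dict.empty : PySem.Dict String (PySem.Dict String Int)).items = [] from rfl]
  rw [hres, List.map_map, ← hkeq]
  refine List.map_congr_left (fun k hkmem => ?_)
  simp only [Function.comp]
  have hi0 : PySem.Dict.ofList
      ((stB.1.items.filter (fun q => q.1.1 == k)).map (fun q => (q.1.2, q.2)))
      = actF.getD k PySem.Dict.empty := by
    apply PySem.Dict.ext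
    rw [ofList_items_of_nodup, hit k]
    · rw [List.map_map]
      exact seconds_nodup _ _ hpcnd
  rw [hi0]
  rw [hfg k, if_pos hkmem]
  rfl

-- ===== VERDICT (by name: the statement is the Claim_ definition above) =====
theorem activity_frequencies_spec : Claim_equal_activity_frequencies := by
  intro log _
  unfold Spec_activity_frequencies
  exact main_eq log
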